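-- pv_equiv track=rewrite | github.com/DoK2412/different | homework/Module20/10_my_zip/main.py | list_procession
-- ===== SOURCE A (Python) =====
-- def list_procession(list_1, list_2):
--     # список для сбора данных
--     final_list = list()
--     # цикл для работы с обоими списками
--     for index_list_1, variable_list_1 in enumerate(list_1):
--         for index_list_2, variable_list_2 in enumerate(list_2):
--             # сравнение индексов списков и создание отдельного значения
--             if index_list_1 == index_list_2:
--                 concatenation_of_values = list()
--                 concatenation_of_values.append(variable_list_1)
--                 concatenation_of_values.append(variable_list_2)
--                 final_list.append(tuple(concatenation_of_values))
--                 break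
--     # возвращение данных из функции
--     return(final_list)
-- ===== SOURCE B (Python) =====
-- def list_procession(list_1, list_2):
--     return list(zip(list_1, list_2))
-- ===== Notes on version B (the rewrite author's own statement) =====
-- stated objective: faster
-- what changed: Replaced the nested enumerate loops that match equal indices with a single zip over the two lists, removing the inner scan.
import Mathlib
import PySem

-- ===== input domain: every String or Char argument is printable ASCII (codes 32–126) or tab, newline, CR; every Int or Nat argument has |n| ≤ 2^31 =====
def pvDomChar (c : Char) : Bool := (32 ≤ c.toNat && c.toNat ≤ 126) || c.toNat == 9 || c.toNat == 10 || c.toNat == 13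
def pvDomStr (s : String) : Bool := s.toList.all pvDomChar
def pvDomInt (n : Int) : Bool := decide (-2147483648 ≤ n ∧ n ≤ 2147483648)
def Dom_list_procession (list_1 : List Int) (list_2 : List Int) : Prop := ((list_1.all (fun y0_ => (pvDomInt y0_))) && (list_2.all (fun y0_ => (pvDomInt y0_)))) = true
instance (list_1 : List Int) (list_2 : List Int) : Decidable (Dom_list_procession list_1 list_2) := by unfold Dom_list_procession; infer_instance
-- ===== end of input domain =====

-- B replaces A's nested enumerate loops (O(n*m)) with a single zip over both lists (O(min(n,m))).
-- ===== PORT A =====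
-- inner `for index_list_2, variable_list_2 in enumerate(list_2)` loop with its break:
-- scan for the first pair whose index equals index_list_1
def pvInner (i : Int) (v1 : Int) : List (Int × Int) → Option (Int × Int)
  | [] => none
  | (j, v2) :: rest => if i = j then some (v1, v2) else pvInner i v1 rest

def list_procession (list_1 : List Int) (list_2 : List Int) : List (Int × Int) :=
  (PySem.List.enumerate list_1 0).foldl
    (fun final_list p =>
      match pvInner p.1 p.2 (PySem.List.enumerate list_2 0) with
      | some q => final_list ++ [q]
      | none => final_list) []

-- ===== PORT B =====
def list_procession_alt (list_1 : List Int) (list_2 : List Int) : List (Int × Int) :=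
  list_1.zip list_2

-- ===== PRECONDITION & SPEC =====
def Spec_list_procession (list_1 : List Int) (list_2 : List Int) (out : List (Int × Int)) : Prop := out = list_procession_alt list_1 list_2
instance (list_1 : List Int) (list_2 : List Int) (out : List (Int × Int)) : Decidable (Spec_list_procession list_1 list_2 out) := by unfold Spec_list_procession; infer_instance

-- ===== CLAIM (what is proved, stated in full; the proofs are below) =====
def Claim_equal_list_procession : Prop := ∀ (list_1 : List Int) (list_2 : List Int), Dom_list_procession list_1 list_2 → Spec_list_procession list_1 list_2 (list_procession list_1 list_2)

-- ===== LEMMAS AND PROOFS =====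

-- pvInner against enumerate l 0 is just indexing
theorem pvInner_enumerate (l : List Int) (s k : Nat) (v : Int) :
    pvInner ((s : Int) + (k : Int)) v (PySem.List.enumerate l s) =
      l[k]?.map (fun x => (v, x)) := by
  induction l generalizing s k with
  | nil => simp [pvInner, PySem.List.enumerate_nil]
  | cons x xs ih =>
    rw [PySem.List.enumerate_cons, pvInner]
    rcases k with _ | k'
    · simp
    · rw [if_neg (by omega)]
      have h : (s : Int) + ((k' + 1 : Nat) : Int) = ((s + 1 : Nat) : Int) + (k' : Int) := by
        push_cast; ring
      have h2 : ((s : Int) + 1) = ((s + 1 : Nat) : Int) := by push_cast; ring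
      rw [h2, h, ih]
      simp

theorem foldl_enumerate_zip (l1 l2 : List Int) (s : Nat) (acc : List (Int × Int)) :
    (PySem.List.enumerate l1 s).foldl
      (fun final_list p =>
        match pvInner p.1 p.2 (PySem.List.enumerate l2 0) with
        | some q => final_list ++ [q]
        | none => final_list) acc = acc ++ l1.zip (l2.drop s) := by
  induction l1 generalizing s acc with
  | nil => simp [PySem.List.enumerate_nil]
  | cons v l1' ih =>
    rw [PySem.List.enumerate_cons, List.foldl_cons]
    have hinner : pvInner (s : Int) v (PySem.List.enumerate l2 0) =
        l2[s]?.map (fun x => (v, x)) := by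
      have := pvInner_enumerate l2 0 s v
      simpa using this
    by_cases hs : s < l2.length
    · obtain ⟨x, hx⟩ : ∃ x, l2[s]? = some x := ⟨l2[s], List.getElem?_eq_getElem hs⟩
      have hdrop : l2.drop s = l2[s] :: l2.drop (s + 1) := List.drop_eq_getElem_cons hs
      simp only [hinner, hx, Option.map_some]
      have h1 : ((s : Int) + 1) = ((s + 1 : Nat) : Int) := by push_cast; ring
      rw [h1, ih]
      rw [hdrop, List.zip_cons_cons, List.getElem?_eq_getElem hs] at *
      simp_all
    · have hnone : l2[s]? = none := List.getElem?_eq_none (by omega)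
      have hdrop : l2.drop s = [] := List.drop_eq_nil_of_le (by omega)
      have hdrop' : l2.drop (s + 1) = [] := List.drop_eq_nil_of_le (by omega)
      simp only [hinner, hnone, Option.map_none]
      have h1 : ((s : Int) + 1) = ((s + 1 : Nat) : Int) := by push_cast; ring
      rw [h1, ih, hdrop, hdrop']
      simp

theorem list_procession_eq (l1 l2 : List Int) :
    list_procession l1 l2 = l1.zip l2 := by
  unfold list_procession
  have := foldl_enumerate_zip l1 l2 0 []
  simpa using this

-- ===== VERDICT =====
theorem list_procession_spec : Claim_equal_list_procession := by
  intro l1 l2 _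
  unfold Spec_list_procession list_procession_alt
  exact list_procession_eq l1 l2
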